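-- pv_equiv track=rewrite | github.com/Tuzass/ear_clipping_viewer | src/__main__.py | colorTriangle
-- ===== SOURCE A (Python) =====
-- def colorTriangle(p_vertices, p_colors, current_triangle):
--     p0 = p_vertices.index(current_triangle[0])
--     p1 = p_vertices.index(current_triangle[1])
--     p2 = p_vertices.index(current_triangle[2])
--
--     for i in range(len(p_vertices)):
--         current_colors = [p_colors[p0], p_colors[p1], p_colors[p2]]
--         if i in [p0, p1, p2] and p_colors[i] is None:
--             for j in range(3):
--                 if j not in current_colors:
--                     p_colors[i] = j
--                     break
--
--     return p_colors
-- ===== SOURCE B (Python) =====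
-- def colorTriangle(p_vertices, p_colors, current_triangle):
--     idxs = sorted({p_vertices.index(v) for v in current_triangle})
--     used = {p_colors[i] for i in idxs}
--     missing = [c for c in range(3) if c not in used]
--     uncolored = [i for i in idxs if p_colors[i] is None]
--     for i, c in zip(uncolored, missing):
--         p_colors[i] = c
--     return p_colors
-- ===== Notes on version B (the rewrite author's own statement) =====
-- stated objective: alternative
-- what changed: B replaces A's greedy smallest-unused-color search (scan all vertex indices, rebuild the used-color snapshot and re-search 0..2 at every step) by a closed-form assignment: compute once the ascending list of uncolored triangle indices and the ascending complement of the used colors in {0,1,2}, and zip them together; correctness rests on the fact that a greedy smallest-first assignment equals pairing the sorted free colors with the sorted uncolored slots.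
import Mathlib
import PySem

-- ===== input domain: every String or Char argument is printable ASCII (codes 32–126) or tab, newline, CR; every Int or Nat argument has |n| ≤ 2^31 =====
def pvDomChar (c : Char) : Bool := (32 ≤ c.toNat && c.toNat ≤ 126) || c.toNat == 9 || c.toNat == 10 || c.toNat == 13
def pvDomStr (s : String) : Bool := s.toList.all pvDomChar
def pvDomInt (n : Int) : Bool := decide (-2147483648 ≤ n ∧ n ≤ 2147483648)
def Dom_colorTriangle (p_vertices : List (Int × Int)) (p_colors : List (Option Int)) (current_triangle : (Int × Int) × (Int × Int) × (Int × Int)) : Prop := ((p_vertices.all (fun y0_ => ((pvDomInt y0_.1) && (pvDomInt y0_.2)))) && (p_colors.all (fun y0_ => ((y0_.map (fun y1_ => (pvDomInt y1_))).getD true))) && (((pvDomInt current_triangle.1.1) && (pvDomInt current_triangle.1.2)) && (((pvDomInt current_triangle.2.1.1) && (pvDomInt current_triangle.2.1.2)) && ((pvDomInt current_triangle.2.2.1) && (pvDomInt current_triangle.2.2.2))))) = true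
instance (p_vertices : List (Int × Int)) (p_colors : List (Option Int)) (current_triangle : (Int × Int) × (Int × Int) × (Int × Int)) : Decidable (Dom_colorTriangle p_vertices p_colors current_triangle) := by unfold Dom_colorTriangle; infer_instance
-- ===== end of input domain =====

-- B replaces A's per-index greedy smallest-unused-color search by a closed-form assignment:
-- zip the ascending uncolored triangle indices with the ascending complement of the used colors
-- (objective: alternative). Both Pythons mutate p_colors in place; the equivalence proved here is
-- about the RETURN value only (B performs the same mutation).

-- ===== PORT A =====
def colorTriangle (p_vertices : List (Int × Int)) (p_colors : List (Option Int)) (current_triangle : (Int × Int) × (Int × Int) × (Int × Int)) : List (Option Int) :=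
  match PySem.List.index? p_vertices current_triangle.1,
        PySem.List.index? p_vertices current_triangle.2.1,
        PySem.List.index? p_vertices current_triangle.2.2 with
  | some p0, some p1, some p2 =>
      -- for i in range(len(p_vertices)): … (p_colors[k] reads are in range under Pre_; getD is exact there)
      (List.range p_vertices.length).foldl (fun cols i =>
        let current_colors : List (Option Int) := [cols.getD p0 none, cols.getD p1 none, cols.getD p2 none]
        if (i = p0 ∨ i = p1 ∨ i = p2) ∧ cols.getD i none = none then
          match ([0, 1, 2] : List Int).find? (fun j => !(current_colors.contains (some j))) with
          | some j => cols.set i (some j)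
          | none => cols
        else cols) p_colors
  | _, _, _ => p_colors  -- .index raised ValueError: excluded by Pre_

-- ===== PORT B =====
def colorTriangle_alt (p_vertices : List (Int × Int)) (p_colors : List (Option Int)) (current_triangle : (Int × Int) × (Int × Int) × (Int × Int)) : List (Option Int) :=
  match PySem.List.index? p_vertices current_triangle.1,
        PySem.List.index? p_vertices current_triangle.2.1,
        PySem.List.index? p_vertices current_triangle.2.2 with
  | some p0, some p1, some p2 =>
      -- idxs = sorted({index(v) for v in current_triangle})
      let idxs : List Nat := PySem.List.sorted (PySem.Set.ofList [p0, p1, p2]) (fun x => x) false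
      -- used = {p_colors[i] for i in idxs}
      let used : PySem.Set (Option Int) := PySem.Set.ofList (idxs.map (fun i => p_colors.getD i none))
      -- missing = [c for c in range(3) if c not in used]
      let missing : List Int := ([0, 1, 2] : List Int).filter (fun c => !(PySem.Set.contains used (some c)))
      -- uncolored = [i for i in idxs if p_colors[i] is None]
      let uncolored : List Nat := idxs.filter (fun i => (p_colors.getD i none).isNone)
      -- for i, c in zip(uncolored, missing): p_colors[i] = c
      (uncolored.zip missing).foldl (fun cols p => cols.set p.1 (some p.2)) p_colors
  | none, _, _ => p_colors  -- .index raised ValueError: excluded by Pre_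
  | _, none, _ => p_colors
  | _, _, none => p_colors

-- ===== PRECONDITION & SPEC =====
-- Pre_ excludes exactly the inputs where A raises: a triangle vertex absent from p_vertices
-- (ValueError from .index) or a resulting index not below len(p_colors) (IndexError when reading
-- the color snapshot). B raises at the same inputs.
def Pre_colorTriangle (p_vertices : List (Int × Int)) (p_colors : List (Option Int)) (current_triangle : (Int × Int) × (Int × Int) × (Int × Int)) : Prop :=
  current_triangle.1 ∈ p_vertices ∧ current_triangle.2.1 ∈ p_vertices ∧ current_triangle.2.2 ∈ p_vertices ∧
  p_vertices.idxOf current_triangle.1 < p_colors.length ∧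
  p_vertices.idxOf current_triangle.2.1 < p_colors.length ∧
  p_vertices.idxOf current_triangle.2.2 < p_colors.length
instance (p_vertices : List (Int × Int)) (p_colors : List (Option Int)) (current_triangle : (Int × Int) × (Int × Int) × (Int × Int)) : Decidable (Pre_colorTriangle p_vertices p_colors current_triangle) := by unfold Pre_colorTriangle; infer_instance

def pvWitness_colorTriangle : (List (Int × Int)) × List (Option Int) × ((Int × Int) × (Int × Int) × (Int × Int)) :=
  ([(0, 0), (1, 0), (0, 1)], [none, some 0, none], ((0, 0), (1, 0), (0, 1)))

def Spec_colorTriangle (p_vertices : List (Int × Int)) (p_colors : List (Option Int)) (current_triangle : (Int × Int) × (Int × Int) × (Int × Int)) (out : List (Option Int)) : Prop := out = colorTriangle_alt p_vertices p_colors current_triangle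
instance (p_vertices : List (Int × Int)) (p_colors : List (Option Int)) (current_triangle : (Int × Int) × (Int × Int) × (Int × Int)) (out : List (Option Int)) : Decidable (Spec_colorTriangle p_vertices p_colors current_triangle out) := by unfold Spec_colorTriangle; infer_instance

-- ===== CLAIM (what is proved, stated in full; the proofs are below) =====
def Claim_equal_colorTriangle : Prop := ∀ (p_vertices : List (Int × Int)) (p_colors : List (Option Int)) (current_triangle : (Int × Int) × (Int × Int) × (Int × Int)), Dom_colorTriangle p_vertices p_colors current_triangle → Pre_colorTriangle p_vertices p_colors current_triangle → Spec_colorTriangle p_vertices p_colors current_triangle (colorTriangle p_vertices p_colors current_triangle)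

-- ===== LEMMAS AND PROOFS =====

-- A fold whose step fixes the accumulator outside p is a fold over the filtered list.
theorem pv_foldl_filter {α β : Type} (f : β → α → β) (p : α → Bool) (l : List α)
    (h : ∀ b x, x ∈ l → p x = false → f b x = b) (b : β) :
    l.foldl f b = (l.filter p).foldl f b := by
  induction l generalizing b with
  | nil => rfl
  | cons x xs ih =>
      by_cases hx : p x
      · simp only [List.filter_cons, hx, if_pos, List.foldl_cons]
        exact ih (fun b y hy => h b y (List.mem_cons_of_mem _ hy)) (f b x)
      · simp only [Bool.not_eq_true] at hx
        simp only [List.filter_cons, hx, List.foldl_cons, Bool.false_eq_true, if_false,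
          h b x List.mem_cons_self hx]
        exact ih (fun b y hy => h b y (List.mem_cons_of_mem _ hy)) b

theorem pv_idxOf?_eq_some {α : Type} [BEq α] [LawfulBEq α] (l : List α) (a : α) (h : a ∈ l) :
    l.idxOf? a = some (l.idxOf a) := by
  induction l with
  | nil => cases h
  | cons x xs ih =>
      by_cases hx : (x == a) = true
      · simp [List.idxOf?_cons, List.idxOf_cons, hx]
      · have ha : a ∈ xs := by
          rcases List.mem_cons.1 h with h' | h'
          · exact absurd (by simp [h']) hx
          · exact h'
        simp [List.idxOf?_cons, List.idxOf_cons, hx, ih ha]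

-- getD after set, in range
theorem pv_getD_set (l : List (Option Int)) (i : Nat) (v : Option Int) (j : Nat) (h : j < l.length) :
    (l.set i v).getD j none = if i = j then v else l.getD j none := by
  simp only [List.getD_eq_getElem?_getD, List.getElem?_set]
  split_ifs <;> simp_all

-- the ascending unique triangle-index list is range-filter
theorem pv_sorted_eq_filter (p0 p1 p2 n : Nat) (h0 : p0 < n) (h1 : p1 < n) (h2 : p2 < n) :
    PySem.List.sorted (PySem.Set.ofList [p0, p1, p2]) (fun x => x) false
      = (List.range n).filter (fun i => decide (i = p0 ∨ i = p1 ∨ i = p2)) := by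
  apply PySem.List.sorted_eq_of_perm_of_pairwise_lt
  · rw [List.perm_ext_iff_of_nodup (List.Nodup.filter _ (List.nodup_range)) (PySem.Set.nodup_ofList _)]
    intro a
    simp only [List.mem_filter, List.mem_range, PySem.Set.mem_ofList, decide_eq_true_eq,
      List.mem_cons, List.not_mem_nil, or_false]
    constructor
    · rintro ⟨_, h⟩; exact h
    · rintro (rfl | rfl | rfl) <;> exact ⟨by omega, by tauto⟩
  · exact List.Pairwise.filter _ List.pairwise_lt_range

-- find? is the head of the filtered list
theorem pv_find?_eq_head_filter {α : Type} (p : α → Bool) (l : List α) :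
    l.find? p = (l.filter p).head? := by
  induction l with
  | nil => rfl
  | cons x xs ih =>
      by_cases hx : p x
      · rw [List.find?_cons_of_pos hx, List.filter_cons, if_pos hx, List.head?_cons]
      · simp only [Bool.not_eq_true] at hx
        rw [List.find?_cons_of_neg (by simp [hx]), List.filter_cons]
        simp only [hx, Bool.false_eq_true, if_false]
        exact ih

-- among three option slots one of which is none, some color of {0,1,2} is absent
theorem pv_exists_missing (x y : Option Int) :
    ∃ c : Int, c ∈ ([0, 1, 2] : List Int) ∧ some c ≠ x ∧ some c ≠ y := by
  have step : ∀ (z : Option Int) (a b : Int), some a = z → some b = z → a = b :=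
    fun z a b ha hb => Option.some.inj (ha.trans hb.symm)
  by_cases h0 : some (0 : Int) = x ∨ some (0 : Int) = y
  · by_cases h1 : some (1 : Int) = x ∨ some (1 : Int) = y
    · rcases h0 with h0 | h0 <;> rcases h1 with h1 | h1
      · exact absurd (step x 0 1 h0 h1) (by norm_num)
      · exact ⟨2, by simp, fun h => absurd (step x 0 2 h0 h) (by norm_num),
          fun h => absurd (step y 1 2 h1 h) (by norm_num)⟩
      · exact ⟨2, by simp, fun h => absurd (step x 1 2 h1 h) (by norm_num),
          fun h => absurd (step y 0 2 h0 h) (by norm_num)⟩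
      · exact absurd (step y 0 1 h0 h1) (by norm_num)
    · push_neg at h1
      exact ⟨1, by simp, h1.1, h1.2⟩
  · push_neg at h0
    exact ⟨0, by simp, h0.1, h0.2⟩

set_option maxHeartbeats 1000000 in
-- main correspondence: A's greedy scan over idxs equals B's zip of the uncolored indices with the
-- ascending complement of the colors currently visible at p0,p1,p2
theorem pv_main (p0 p1 p2 : Nat) :
    ∀ (idxs : List Nat) (cols : List (Option Int)) (missing : List Int),
      (∀ i ∈ idxs, (i = p0 ∨ i = p1 ∨ i = p2)) → idxs.Nodup →
      p0 < cols.length → p1 < cols.length → p2 < cols.length →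
      missing = ([0, 1, 2] : List Int).filter
        (fun c => !(([cols.getD p0 none, cols.getD p1 none, cols.getD p2 none] : List (Option Int)).contains (some c))) →
      idxs.foldl (fun cols i =>
          let current_colors : List (Option Int) := [cols.getD p0 none, cols.getD p1 none, cols.getD p2 none]
          if (i = p0 ∨ i = p1 ∨ i = p2) ∧ cols.getD i none = none then
            match ([0, 1, 2] : List Int).find? (fun j => !(current_colors.contains (some j))) with
            | some j => cols.set i (some j)
            | none => cols
          else cols) cols
        = ((idxs.filter (fun i => (cols.getD i none).isNone)).zip missing).foldl
            (fun cols p => cols.set p.1 (some p.2)) cols := by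
  intro idxs
  induction idxs with
  | nil => intro cols missing _ _ _ _ _ _; rfl
  | cons i t ih =>
    intro cols missing hidx hnd h0 h1 h2 hmiss
    have hi : i = p0 ∨ i = p1 ∨ i = p2 := hidx i List.mem_cons_self
    have hiL : i < cols.length := by rcases hi with rfl | rfl | rfl <;> assumption
    have hnt : i ∉ t := (List.nodup_cons.1 hnd).1
    have hndt : t.Nodup := (List.nodup_cons.1 hnd).2
    have hidxt : ∀ x ∈ t, x = p0 ∨ x = p1 ∨ x = p2 := fun x hx => hidx x (List.mem_cons_of_mem _ hx)
    simp only [List.foldl_cons, List.filter_cons]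
    by_cases hc : cols.getD i none = none
    · -- i present and uncolored: A assigns the smallest missing color, B pairs it with missing.head
      have hne : missing ≠ [] := by
        subst hmiss
        intro hnil
        rw [List.filter_eq_nil_iff] at hnil
        have hmemsnap : ∀ c : Int, c ∈ ([0, 1, 2] : List Int) →
            some c = cols.getD p0 none ∨ some c = cols.getD p1 none ∨ some c = cols.getD p2 none := by
          intro c hcm
          have hn := hnil c hcm
          have hcont : (([cols.getD p0 none, cols.getD p1 none, cols.getD p2 none] : List (Option Int)).contains (some c)) = true := by
            by_contra hcf
            exact hn (by simp [Bool.not_eq_true] at hcf ⊢; exact hcf)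
          simpa only [List.contains_eq_mem, decide_eq_true_eq, List.mem_cons,
            List.not_mem_nil, or_false] using hcont
        rcases hi with rfl | rfl | rfl
        · obtain ⟨c, hcm, hcx, hcy⟩ := pv_exists_missing (cols.getD p1 none) (cols.getD p2 none)
          rcases hmemsnap c hcm with h | h | h
          · exact (Option.some_ne_none c) (h.trans hc)
          · exact hcx h
          · exact hcy h
        · obtain ⟨c, hcm, hcx, hcy⟩ := pv_exists_missing (cols.getD p0 none) (cols.getD p2 none)
          rcases hmemsnap c hcm with h | h | h
          · exact hcx h
          · exact (Option.some_ne_none c) (h.trans hc)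
          · exact hcy h
        · obtain ⟨c, hcm, hcx, hcy⟩ := pv_exists_missing (cols.getD p0 none) (cols.getD p1 none)
          rcases hmemsnap c hcm with h | h | h
          · exact hcx h
          · exact hcy h
          · exact (Option.some_ne_none c) (h.trans hc)
      obtain ⟨j, mt, rfl⟩ : ∃ j mt, missing = j :: mt := by
        cases missing with
        | nil => exact absurd rfl hne
        | cons a b => exact ⟨a, b, rfl⟩
      have hfind :
          ([0, 1, 2] : List Int).find? (fun j =>
              !(([cols.getD p0 none, cols.getD p1 none, cols.getD p2 none] : List (Option Int)).contains (some j)))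
            = some j := by
        rw [pv_find?_eq_head_filter, ← hmiss]; rfl
      simp only [hfind, hc, Option.isNone_none, if_pos, and_true, List.zip_cons_cons,
        List.foldl_cons]
      rw [if_pos hi]
      -- tail: apply IH at cols' = cols.set i (some j) with missing' = mt
      set cols' := cols.set i (some j) with hcols'
      have hlen : cols'.length = cols.length := by simp [hcols']
      have hget : ∀ k, k < cols.length → cols'.getD k none = if i = k then some j else cols.getD k none :=
        fun k hk => pv_getD_set cols i (some j) k hk
      -- the filtered uncolored tail is unchanged (i ∉ t)
      have hfilt : t.filter (fun x => (cols'.getD x none).isNone) = t.filter (fun x => (cols.getD x none).isNone) := by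
        apply List.filter_congr
        intro x hx
        have hxL : x < cols.length := by rcases hidxt x hx with rfl | rfl | rfl <;> assumption
        have : i ≠ x := fun h => hnt (h ▸ hx)
        rw [hget x hxL, if_neg this]
      -- missing' characterization
      have hj_mem : (j :: mt) = ([0, 1, 2] : List Int).filter
          (fun c => !(([cols.getD p0 none, cols.getD p1 none, cols.getD p2 none] : List (Option Int)).contains (some c))) := hmiss
      have hcontains : ∀ c : Int,
          (([cols'.getD p0 none, cols'.getD p1 none, cols'.getD p2 none] : List (Option Int)).contains (some c))
            = ((([cols.getD p0 none, cols.getD p1 none, cols.getD p2 none] : List (Option Int)).contains (some c)) || (c == j)) := by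
        intro c
        rw [hget p0 h0, hget p1 h1, hget p2 h2, Bool.eq_iff_iff]
        simp only [List.contains_eq_mem, decide_eq_true_eq, Bool.or_eq_true, beq_iff_eq,
          List.mem_cons, List.not_mem_nil, or_false]
        by_cases e0 : i = p0 <;> by_cases e1 : i = p1 <;> by_cases e2 : i = p2 <;>
          first
          | (exfalso; tauto)
          | (simp_all; try tauto)
      have hmiss' : mt = ([0, 1, 2] : List Int).filter
          (fun c => !(([cols'.getD p0 none, cols'.getD p1 none, cols'.getD p2 none] : List (Option Int)).contains (some c))) := by
        have hnodup : (j :: mt).Nodup := hj_mem ▸ List.Nodup.filter _ (by decide)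
        have hjnot : j ∉ mt := (List.nodup_cons.1 hnodup).1
        have heq : ([0, 1, 2] : List Int).filter
            (fun c => !(([cols'.getD p0 none, cols'.getD p1 none, cols'.getD p2 none] : List (Option Int)).contains (some c)))
          = ((j :: mt).filter (fun c => !(c == j))) := by
          rw [hj_mem, List.filter_filter]
          apply List.filter_congr
          intro c _
          rw [hcontains c]
          cases hb : (([cols.getD p0 none, cols.getD p1 none, cols.getD p2 none] : List (Option Int)).contains (some c)) <;>
            cases hb2 : (c == j) <;> simp [hb, hb2]
        rw [heq, List.filter_cons]
        simp only [beq_self_eq_true, Bool.not_true, Bool.false_eq_true, if_false]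
        exact (List.filter_eq_self.mpr (fun c hcm => by
          have hne : c ≠ j := fun h => hjnot (h ▸ hcm)
          simp [hne])).symm
      rw [← hfilt]
      exact ih cols' mt hidxt hndt (hlen ▸ h0) (hlen ▸ h1) (hlen ▸ h2) hmiss'
    · -- i already colored: A skips, B filters i out
      have hnc : ¬ ((i = p0 ∨ i = p1 ∨ i = p2) ∧ cols.getD i none = none) := fun h => hc h.2
      simp only [if_neg hnc]
      have hbn : ((cols.getD i none).isNone) = false := by
        cases h : cols.getD i none with
        | none => exact absurd h hc
        | some v => rfl
      simp only [hbn, Bool.false_eq_true, if_false]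
      exact ih cols missing hidxt hndt h0 h1 h2 hmiss

set_option maxHeartbeats 1000000 in
theorem colorTriangle_spec : Claim_equal_colorTriangle := by
  intro pv pc tri _ hpre
  obtain ⟨hm0, hm1, hm2, hl0, hl1, hl2⟩ := hpre
  show colorTriangle pv pc tri = colorTriangle_alt pv pc tri
  have e0 : PySem.List.index? pv tri.1 = some (pv.idxOf tri.1) := by
    rw [PySem.List.index?_eq_idxOf?]; exact pv_idxOf?_eq_some _ _ hm0
  have e1 : PySem.List.index? pv tri.2.1 = some (pv.idxOf tri.2.1) := by
    rw [PySem.List.index?_eq_idxOf?]; exact pv_idxOf?_eq_some _ _ hm1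
  have e2 : PySem.List.index? pv tri.2.2 = some (pv.idxOf tri.2.2) := by
    rw [PySem.List.index?_eq_idxOf?]; exact pv_idxOf?_eq_some _ _ hm2
  set p0 := pv.idxOf tri.1 with hp0def
  set p1 := pv.idxOf tri.2.1 with hp1def
  set p2 := pv.idxOf tri.2.2 with hp2def
  have hn0 : p0 < pv.length := List.idxOf_lt_length_of_mem hm0
  have hn1 : p1 < pv.length := List.idxOf_lt_length_of_mem hm1
  have hn2 : p2 < pv.length := List.idxOf_lt_length_of_mem hm2
  rw [colorTriangle, colorTriangle_alt, e0, e1, e2]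
  dsimp only
  rw [pv_foldl_filter _ (fun i => decide (i = p0 ∨ i = p1 ∨ i = p2)) _
        (by
          intro b x _ hx
          simp only [decide_eq_false_iff_not] at hx
          have hcnd : ¬ ((x = p0 ∨ x = p1 ∨ x = p2) ∧ b.getD x none = none) := fun hcc => hx hcc.1
          simp only [if_neg hcnd]) pc]
  rw [pv_sorted_eq_filter p0 p1 p2 pv.length hn0 hn1 hn2]
  set idxs := (List.range pv.length).filter (fun i => decide (i = p0 ∨ i = p1 ∨ i = p2)) with hidxs
  have hmem : ∀ i ∈ idxs, i = p0 ∨ i = p1 ∨ i = p2 := by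
    intro i hix
    have := List.mem_filter.1 hix
    simpa using this.2
  have hnd : idxs.Nodup := List.Nodup.filter _ List.nodup_range
  -- B's used-set over idxs sees exactly the snapshot colors at p0,p1,p2
  have hused : (([0, 1, 2] : List Int).filter
        (fun c => !(PySem.Set.contains (PySem.Set.ofList (idxs.map (fun i => pc.getD i none))) (some c))))
      = (([0, 1, 2] : List Int).filter
        (fun c => !(([pc.getD p0 none, pc.getD p1 none, pc.getD p2 none] : List (Option Int)).contains (some c)))) := by
    apply List.filter_congr
    intro c _
    have : (PySem.Set.contains (PySem.Set.ofList (idxs.map (fun i => pc.getD i none))) (some c))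
        = (([pc.getD p0 none, pc.getD p1 none, pc.getD p2 none] : List (Option Int)).contains (some c)) := by
      rw [PySem.Set.contains_eq_listContains, Bool.eq_iff_iff]
      simp only [List.contains_eq_mem, decide_eq_true_eq, PySem.Set.mem_ofList, List.mem_map,
        List.mem_cons, List.not_mem_nil, or_false]
      constructor
      · rintro ⟨i, hix, hh⟩
        rcases hmem i hix with rfl | rfl | rfl
        · exact Or.inl hh.symm
        · exact Or.inr (Or.inl hh.symm)
        · exact Or.inr (Or.inr hh.symm)
      · rintro (h | h | h)
        · exact ⟨p0, List.mem_filter.2 ⟨List.mem_range.2 hn0, by simp⟩, h.symm⟩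
        · exact ⟨p1, List.mem_filter.2 ⟨List.mem_range.2 hn1, by simp⟩, h.symm⟩
        · exact ⟨p2, List.mem_filter.2 ⟨List.mem_range.2 hn2, by simp⟩, h.symm⟩
    rw [this]
  rw [hused]
  exact pv_main p0 p1 p2 idxs pc _ hmem hnd hl0 hl1 hl2 rfl
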